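-- pv_equiv track=rewrite | github.com/NaokiMatsumoto/Python_algorithm | search/FriendScore.py | highest_score
-- ===== SOURCE A (Python) =====
-- def highest_score(friends):
--     # friends_count 最終的な返り値
--     friends_count = 0
--     # 0人目から最後の人までループ
--     for row in range(len(friends)):
--         # row人目の友人、友人の友人の数(friends_count_tmp)を初期化
--         friends_count_tmp = 0
--         # col を0人目から最後までループ、row人目とcol人目が友人かチェック
--         for col in range(len(friends)):
--             # row == col 同じ人を探索している場合は、飛ばす
--             if row == col:
--                 continue
--             # 友達の場合は、friends_count_tmpに1加える
--             if friends[row][col] == 'Y':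
--                 friends_count_tmp += 1
--             else:
--                 # 友達でなかった場合も、index番目の人がお互いの友達の場合は、友達の友達となるためfriends_count_tmpに1加える
--                 for index in range(len(friends)):
--                     if friends[row][index] == 'Y' and friends[index][col] == 'Y':
--                         friends_count_tmp += 1
--         #maxをとる。
--         friends_count = max(friends_count_tmp, friends_count)
--     return friends_count
-- ===== SOURCE B (Python) =====
-- def highest_score(friends):
--     n = len(friends)
--     best = 0
--     for row in range(n):
--         r = friends[row]
--         # scatter pass: paths[col] = number of 2-paths row -> k -> col
--         paths = [0] * n
--         for k in range(n):
--             if r[k] == 'Y':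
--                 fk = friends[k]
--                 for col in range(n):
--                     if fk[col] == 'Y':
--                         paths[col] += 1
--         # combine: direct friends count 1, others count their 2-paths
--         tmp = 0
--         for col in range(n):
--             if col != row:
--                 tmp += 1 if r[col] == 'Y' else paths[col]
--         best = max(best, tmp)
--     return best
-- ===== Notes on version B (the rewrite author's own statement) =====
-- stated objective: faster
-- what changed: Instead of scanning all intermediaries per (row,col) pair, B computes each row's full 2-path count vector in one scatter pass over the row's neighbors (loop order row->k->col) and then combines it with the direct-friend row in a separate pass.
-- outside the precondition, e.g. on highest_score([['Y', 'Y'], ['Y']]): A returns 1, B raises IndexError; on highest_score([[]]): A returns 0, B raises IndexError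
import Mathlib
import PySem

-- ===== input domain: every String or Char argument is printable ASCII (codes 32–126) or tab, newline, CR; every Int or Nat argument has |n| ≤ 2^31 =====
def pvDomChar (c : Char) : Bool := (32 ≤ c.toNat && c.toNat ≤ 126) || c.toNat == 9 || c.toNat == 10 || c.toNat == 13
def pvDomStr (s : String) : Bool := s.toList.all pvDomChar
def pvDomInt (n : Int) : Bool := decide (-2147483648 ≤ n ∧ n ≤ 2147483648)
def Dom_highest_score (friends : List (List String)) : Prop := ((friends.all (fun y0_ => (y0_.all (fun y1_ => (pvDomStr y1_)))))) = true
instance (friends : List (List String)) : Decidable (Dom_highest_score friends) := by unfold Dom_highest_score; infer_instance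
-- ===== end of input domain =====

-- B computes each row's 2-path vector in one scatter pass over the row's neighbors and then
-- combines it with the direct-friend row; measurably faster (constant factor) than A's per-pair scan.

-- shared total indexing helper: friends[i][j]; Pre_ guarantees every access is in range,
-- so the getD defaults are never the value Python would have raised on
def getY (friends : List (List String)) (i j : Nat) : String :=
  (friends.getD i []).getD j ""

-- ===== PORT A =====
def highest_score (friends : List (List String)) : Int :=
  (List.range friends.length).foldl (fun friends_count row =>
    let friends_count_tmp : Int :=
      (List.range friends.length).foldl (fun tmp col =>
        if row == col then tmp
        else if getY friends row col == "Y" then tmp + 1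
        else (List.range friends.length).foldl (fun t index =>
          if getY friends row index == "Y" && getY friends index col == "Y" then t + 1 else t) tmp) 0
    max friends_count_tmp friends_count) 0

-- ===== PORT B =====
def highest_score_alt (friends : List (List String)) : Int :=
  (List.range friends.length).foldl (fun best row =>
    -- scatter pass: paths[col] = number of 2-paths row -> k -> col
    let paths : List Int :=
      (List.range friends.length).foldl (fun paths k =>
        if getY friends row k == "Y" then
          (List.range friends.length).foldl (fun p col =>
            if getY friends k col == "Y" then p.set col (p.getD col 0 + 1) else p) paths
        else paths) (List.replicate friends.length (0 : Int))
    -- combine: direct friends count 1, others count their 2-paths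
    let tmp : Int :=
      (List.range friends.length).foldl (fun tmp col =>
        if col ≠ row then tmp + (if getY friends row col == "Y" then 1 else paths.getD col 0)
        else tmp) 0
    max best tmp) 0

-- ===== PRECONDITION & SPEC =====
-- Pre_ excludes ragged inputs (some row shorter than the number of rows), on which Python A
-- generally raises IndexError and B's scatter pass always does (though A happens to return
-- on a few such inputs whose short entries are never reached).
def Pre_highest_score (friends : List (List String)) : Prop :=
  ∀ r ∈ friends, friends.length ≤ r.length
instance (friends : List (List String)) : Decidable (Pre_highest_score friends) := by
  unfold Pre_highest_score; infer_instance

def pvWitness_highest_score : List (List String) := [["N", "Y"], ["Y", "N"]]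

def Spec_highest_score (friends : List (List String)) (out : Int) : Prop := out = highest_score_alt friends
instance (friends : List (List String)) (out : Int) : Decidable (Spec_highest_score friends out) := by unfold Spec_highest_score; infer_instance

-- ===== CLAIM (what is proved, stated in full; the proofs are below) =====
def Claim_equal_highest_score : Prop := ∀ (friends : List (List String)), Dom_highest_score friends → Pre_highest_score friends → Spec_highest_score friends (highest_score friends)

-- ===== LEMMAS AND PROOFS =====

-- the inner scatter fold preserves the length of the accumulator list
theorem scatter_inner_len (cs : List Nat) (q : Nat → Bool) (p : List Int) :
    (cs.foldl (fun p col => if q col then p.set col (p.getD col 0 + 1) else p) p).length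
      = p.length := by
  induction cs generalizing p with
  | nil => rfl
  | cons c t ih =>
    simp only [List.foldl_cons]
    rw [ih]
    split <;> simp

-- one scatter over a duplicate-free column list adds 1 at index c exactly when c is hit
theorem scatter_inner_getD (cs : List Nat) (hnd : cs.Nodup) (q : Nat → Bool)
    (p : List Int) (c : Nat) (hc : c < p.length) :
    (cs.foldl (fun p col => if q col then p.set col (p.getD col 0 + 1) else p) p).getD c 0
      = p.getD c 0 + (if c ∈ cs ∧ q c then 1 else 0) := by
  induction cs generalizing p with
  | nil => simp
  | cons a t ih =>
    have hnd' := hnd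
    rw [List.nodup_cons] at hnd'
    simp only [List.foldl_cons]
    by_cases hac : a = c
    · subst hac
      have hnotin : a ∉ t := hnd'.1
      rw [ih hnd'.2]
      · by_cases hq : q a = true
        · simp [hq, hnotin, List.getD, List.getElem?_set_self hc]
        · simp [hq, hnotin]
      · split <;> simp [hc]
    · have hgd : ∀ p' : List Int, (if q a then p'.set a (p'.getD a 0 + 1) else p').getD c 0 = p'.getD c 0 := by
        intro p'
        split
        · simp [List.getD, List.getElem?_set_ne hac]
        · rfl
      rw [ih hnd'.2]
      · rw [hgd]
        have hca : ¬ c = a := fun h => hac h.symm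
        simp [hca]
      · split <;> simp [hc]

-- the full scatter pass computes, at each in-range index c, the 2-path count through ks
theorem scatter_getD (friends : List (List String)) (row : Nat) (ks : List Nat)
    (p : List Int) (c : Nat) (hc : c < p.length) (hcn : c < friends.length) :
    (ks.foldl (fun p k =>
        if getY friends row k == "Y" then
          (List.range friends.length).foldl (fun p col =>
            if getY friends k col == "Y" then p.set col (p.getD col 0 + 1) else p) p
        else p) p).getD c 0
      = p.getD c 0 + (ks.countP (fun k => getY friends row k == "Y" && getY friends k c == "Y") : Int) := by
  induction ks generalizing p with
  | nil => simp
  | cons k t ih =>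
    simp only [List.foldl_cons]
    by_cases hq : (getY friends row k == "Y") = true
    · rw [if_pos hq]
      rw [ih _ (by rw [scatter_inner_len]; exact hc)]
      rw [scatter_inner_getD _ List.nodup_range _ _ _ hc]
      simp only [List.mem_range, hcn, true_and]
      rw [List.countP_cons]
      by_cases hr : (getY friends k c == "Y") = true
      · simp [hq, hr]; ring
      · simp [hq, hr]
    · rw [if_neg hq]
      rw [ih _ hc]
      rw [List.countP_cons]
      simp [hq]

-- per-row counts agree: A's per-pair intermediary scan equals B's scatter-then-combine
theorem inner_eq (friends : List (List String)) (row : Nat) :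
    (List.range friends.length).foldl (fun tmp col =>
        if row == col then tmp
        else if getY friends row col == "Y" then tmp + 1
        else (List.range friends.length).foldl (fun t index =>
          if getY friends row index == "Y" && getY friends index col == "Y" then t + 1 else t) tmp) (0 : Int)
      = (List.range friends.length).foldl (fun tmp col =>
        if col ≠ row then tmp + (if getY friends row col == "Y" then 1 else
          (((List.range friends.length).foldl (fun paths k =>
            if getY friends row k == "Y" then
              (List.range friends.length).foldl (fun p col =>
                if getY friends k col == "Y" then p.set col (p.getD col 0 + 1) else p) paths
            else paths) (List.replicate friends.length (0 : Int))).getD col 0))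
        else tmp) (0 : Int) := by
  apply PySem.List.foldl_congr_mem
  intro acc col hcol
  have hcoln : col < friends.length := List.mem_range.mp hcol
  by_cases hrc : row = col
  · simp [hrc]
  · have h1 : (row == col) = false := by simp [hrc]
    rw [h1, if_pos (Ne.symm hrc)]
    simp only [Bool.false_eq_true, if_false]
    by_cases hY : (getY friends row col == "Y") = true
    · rw [if_pos hY, if_pos hY]
    · rw [if_neg hY, if_neg hY]
      rw [scatter_getD friends row _ _ col (by simp [hcoln]) hcoln]
      rw [PySem.List.foldl_count_if]
      simp [List.getD, hcoln]

-- ===== VERDICT (by name: the statement is the Claim_ definition above) =====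
theorem highest_score_spec : Claim_equal_highest_score := by
  intro friends _ _
  unfold Spec_highest_score highest_score highest_score_alt
  apply PySem.List.foldl_congr_mem
  intro acc row hrow
  rw [inner_eq friends row]
  exact max_comm _ _
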